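-- pv_equiv track=rewrite | github.com/rsj-rishabh/Mark8 | border_sort.py | index_order
-- ===== SOURCE A (Python) =====
-- def index_order(n,k):
--     index_order = []
--     for i in range(k,n-k):
--         index_order.append([k,i])
--     for i in range(k+1,n-k):
--         index_order.append([i,n-k-1])
--     for i in range(n-1-(k+1),k,-1):
--         index_order.append([n-k-1,i])
--     for i in range(n-(k+1),k,-1):
--         index_order.append([i,k])
--
--     return index_order
-- ===== SOURCE B (Python) =====
-- def index_order(n, k):
--     s = n - 2 * k
--     if s <= 0:
--         return []
--     if s == 1:
--         return [[k, k]]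
--
--     def cell(t):
--         side, off = divmod(t, s - 1)
--         if side == 0:
--             return [k, k + off]
--         if side == 1:
--             return [k + off, n - k - 1]
--         if side == 2:
--             return [n - k - 1, n - k - 1 - off]
--         return [n - k - 1 - off, k]
--
--     return [cell(t) for t in range(4 * s - 4)]
-- ===== Notes on version B (the rewrite author's own statement) =====
-- stated objective: alternative
-- what changed: A builds the ring by four sequential sweeps over coordinate ranges; B instead computes the perimeter length 4*(s-1) and maps a stateless closed-form function over perimeter ordinals t, recovering side and offset by divmod(t, s-1) and returning the cell by pure arithmetic (degenerate rings s<=1 handled by direct branches).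
import Mathlib
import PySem

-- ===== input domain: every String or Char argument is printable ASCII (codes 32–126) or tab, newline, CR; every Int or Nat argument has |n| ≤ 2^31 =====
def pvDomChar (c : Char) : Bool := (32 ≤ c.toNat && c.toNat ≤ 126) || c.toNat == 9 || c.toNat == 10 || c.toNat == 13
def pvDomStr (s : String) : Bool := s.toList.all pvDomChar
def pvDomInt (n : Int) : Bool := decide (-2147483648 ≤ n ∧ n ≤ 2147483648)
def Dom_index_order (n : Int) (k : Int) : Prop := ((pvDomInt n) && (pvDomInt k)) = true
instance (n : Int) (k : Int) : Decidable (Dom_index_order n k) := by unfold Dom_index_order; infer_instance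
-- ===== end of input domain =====

-- B replaces A's four sequential sweeps by a stateless closed-form map over perimeter
-- ordinals (side/offset recovered by divmod) — an alternative formulation, same cost.

-- ===== PORT A =====
def index_order (n : Int) (k : Int) : List (List Int) :=
  let io0 : List (List Int) := []
  let io1 := (PySem.List.pyRange k (n-k) 1).foldl (fun acc i => acc ++ [[k, i]]) io0
  let io2 := (PySem.List.pyRange (k+1) (n-k) 1).foldl (fun acc i => acc ++ [[i, n-k-1]]) io1
  let io3 := (PySem.List.pyRange (n-1-(k+1)) k (-1)).foldl (fun acc i => acc ++ [[n-k-1, i]]) io2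
  let io4 := (PySem.List.pyRange (n-(k+1)) k (-1)).foldl (fun acc i => acc ++ [[i, k]]) io3
  io4

-- ===== PORT B =====
-- Source B's inner 'cell(t)': side, off = divmod(t, s-1) then the four-way branch
def cellB (n k s t : Int) : List Int :=
  let side := PySem.Int.floordiv t (s-1)
  let off := PySem.Int.mod t (s-1)
  if side = 0 then [k, k + off]
  else if side = 1 then [k + off, n - k - 1]
  else if side = 2 then [n - k - 1, n - k - 1 - off]
  else [n - k - 1 - off, k]

def index_order_alt (n : Int) (k : Int) : List (List Int) :=
  let s := n - 2*k
  if s ≤ 0 then []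
  else if s = 1 then [[k, k]]
  else (PySem.List.pyRange 0 (4*s - 4) 1).map (cellB n k s)

-- ===== PRECONDITION & SPEC =====
def Spec_index_order (n : Int) (k : Int) (out : List (List Int)) : Prop := out = index_order_alt n k
instance (n : Int) (k : Int) (out : List (List Int)) : Decidable (Spec_index_order n k out) := by unfold Spec_index_order; infer_instance

-- ===== CLAIM (what is proved, stated in full; the proofs are below) =====
def Claim_equal_index_order : Prop := ∀ (n : Int) (k : Int), Dom_index_order n k → Spec_index_order n k (index_order n k)

-- ===== LEMMAS AND PROOFS =====

theorem pvDivmod (c d j : Int) (hd : 0 < d) (h0 : 0 ≤ j) (hj : j < d) :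
    PySem.Int.floordiv (c*d+j) d = c ∧ PySem.Int.mod (c*d+j) d = j := by
  have h1 : PySem.Int.floordiv (c*d+j) d = c := by
    rw [PySem.Int.floordiv_eq_iff_of_pos hd]
    constructor <;> nlinarith
  refine ⟨h1, ?_⟩
  have := PySem.Int.floordiv_mul_add_mod (c*d+j) d
  rw [h1] at this
  linarith

theorem pvMapEq {α : Type} (t : Nat) (f g : Nat → α) (hfg : ∀ i, i < t → f i = g i) :
    (List.range t).map f = (List.range t).map g :=
  List.map_congr_left (fun i hi => hfg i (List.mem_range.mp hi))

theorem pvPair (a b c d : Int) (h1 : a = c) (h2 : b = d) : [a,b] = [c,d] := by rw [h1, h2]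

theorem pvSplitMap {α : Type} (t : Nat) (f g : Nat → α) (x : α)
    (hfg : ∀ i, i < t → f i = g i) (hx : f t = x) :
    (List.range (t+1)).map f = (List.range t).map g ++ [x] := by
  rw [List.range_succ, List.map_append, List.map_singleton, hx]
  exact congrArg (· ++ [x]) (pvMapEq t f g hfg)

theorem pvConsMap {α : Type} (t : Nat) (f g : Nat → α) (x : α)
    (hx : f 0 = x) (hfg : ∀ i, i < t → f (i+1) = g i) :
    (List.range (t+1)).map f = x :: (List.range t).map g := by
  rw [List.range_succ_eq_map, List.map_cons, List.map_map, hx]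
  exact congrArg (x :: ·) (pvMapEq t _ g (fun i hi => hfg i hi))

theorem main_eq (n k : Int) : index_order n k = index_order_alt n k := by
  by_cases h0 : n - 2*k ≤ 0
  · simp only [index_order, index_order_alt, if_pos h0]
    rw [PySem.List.pyRange_one_eq_nil (by omega), PySem.List.pyRange_one_eq_nil (by omega),
        PySem.List.pyRange_neg_one_eq_nil (by omega), PySem.List.pyRange_neg_one_eq_nil (by omega)]
    simp
  by_cases h1 : n - 2*k = 1
  · simp only [index_order, index_order_alt, if_neg h0, if_pos h1]
    rw [PySem.List.pyRange_one_cons (by omega), PySem.List.pyRange_one_eq_nil (by omega),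
        PySem.List.pyRange_neg_one_eq_nil (by omega), PySem.List.pyRange_neg_one_eq_nil (by omega)]
    simp
  obtain ⟨M, rfl⟩ : ∃ M : Nat, n = 2*k + M + 2 := ⟨(n - 2*k - 2).toNat, by omega⟩
  unfold index_order index_order_alt cellB
  simp only [PySem.List.foldl_append_singleton_eq_map, PySem.List.pyRange_one,
    PySem.List.pyRange_neg_one, List.map_map, List.nil_append]
  rw [if_neg (by omega), if_neg (by omega)]
  have t1 : (2*k + (M:Int) + 2 - k - k).toNat = M + 2 := by omega
  have t2 : (2*k + (M:Int) + 2 - k - (k+1)).toNat = M + 1 := by omega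
  have t3 : (2*k + (M:Int) + 2 - 1 - (k+1) - k).toNat = M := by omega
  have t4 : (2*k + (M:Int) + 2 - (k+1) - k).toNat = M + 1 := by omega
  have t5 : (4*(2*k + (M:Int) + 2 - 2*k) - 4 - 0).toNat = (M+1) + ((M+1) + ((M+1) + (M+1))) := by omega
  rw [t1, t2, t3, t4, t5]
  conv_rhs => rw [@List.range_add (M+1) (M+1+(M+1+(M+1))), @List.range_add (M+1) (M+1+(M+1)),
    @List.range_add (M+1) (M+1)]
  simp only [List.map_append, List.map_map, Function.comp_def,
    show (2*k+(M:Int)+2-2*k-1) = (M:Int)+1 from by ring,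
    show (2*k+(M:Int)+2-k-1) = k+((M:Int)+1) from by ring,
    show (2*k+(M:Int)+2-1-(k+1)) = k+(M:Int) from by ring,
    show (2*k+(M:Int)+2-(k+1)) = k+((M:Int)+1) from by ring,
    zero_add]
  calc List.map (fun x : Nat => [k, k + (x:Int)]) (List.range (M + 2)) ++
          List.map (fun x : Nat => [k + 1 + (x:Int), k + ((M:Int) + 1)]) (List.range (M + 1)) ++
        List.map (fun x : Nat => [k + ((M:Int) + 1), k + (M:Int) - (x:Int)]) (List.range M) ++
      List.map (fun x : Nat => [k + ((M:Int) + 1) - (x:Int), k]) (List.range (M + 1))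
      = (List.map (fun x : Nat => [k, k + (x:Int)]) (List.range (M + 1)) ++ [[k, k + ((M:Int) + 1)]]) ++
          (List.map (fun x : Nat => [k + 1 + (x:Int), k + ((M:Int) + 1)]) (List.range M) ++ [[k + ((M:Int) + 1), k + ((M:Int) + 1)]]) ++
        List.map (fun x : Nat => [k + ((M:Int) + 1), k + (M:Int) - (x:Int)]) (List.range M) ++
      List.map (fun x : Nat => [k + ((M:Int) + 1) - (x:Int), k]) (List.range (M + 1)) := by
        congr 1
        congr 1
        congr 1
        · exact pvSplitMap (M+1) _ _ _ (fun i hi => rfl)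
            (pvPair _ _ _ _ rfl (by push_cast; ring))
        · exact pvSplitMap M _ _ _ (fun i hi => rfl)
            (pvPair _ _ _ _ (by ring) rfl)
    _ = List.map (fun x : Nat => [k, k + (x:Int)]) (List.range (M + 1)) ++
          (([k, k + ((M:Int) + 1)] :: List.map (fun x : Nat => [k + 1 + (x:Int), k + ((M:Int) + 1)]) (List.range M)) ++
          (([k + ((M:Int) + 1), k + ((M:Int) + 1)] :: List.map (fun x : Nat => [k + ((M:Int) + 1), k + (M:Int) - (x:Int)]) (List.range M)) ++
          List.map (fun x : Nat => [k + ((M:Int) + 1) - (x:Int), k]) (List.range (M + 1)))) := by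
        simp [List.append_assoc]
    _ = _ := by
        congr 1
        · exact (pvMapEq (M+1) _ _ (fun i hi => by
            have e : ((i:Nat) : Int) = 0*((M:Int)+1) + (i:Int) := by ring
            rw [e, (pvDivmod 0 ((M:Int)+1) (i:Int) (by positivity) (by positivity)
              (by exact_mod_cast hi)).1,
              (pvDivmod 0 ((M:Int)+1) (i:Int) (by positivity) (by positivity)
              (by exact_mod_cast hi)).2]
            norm_num)).symm
        congr 1
        · exact (pvConsMap M _ _ _
            (by
              have e : ((M+1+0 : Nat) : Int) = 1*((M:Int)+1) + (0:Int) := by push_cast; ring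
              rw [e, (pvDivmod 1 ((M:Int)+1) 0 (by positivity) le_rfl (by positivity)).1,
                (pvDivmod 1 ((M:Int)+1) 0 (by positivity) le_rfl (by positivity)).2]
              norm_num)
            (fun i hi => by
              have e : ((M+1+(i+1) : Nat) : Int) = 1*((M:Int)+1) + ((i:Int)+1) := by push_cast; ring
              rw [e, (pvDivmod 1 ((M:Int)+1) ((i:Int)+1) (by positivity) (by positivity)
                (by omega)).1,
                (pvDivmod 1 ((M:Int)+1) ((i:Int)+1) (by positivity) (by positivity)
                (by omega)).2]
              norm_num
              ring)).symm
        congr 1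
        · exact (pvConsMap M _ _ _
            (by
              have e : ((M+1+(M+1+0) : Nat) : Int) = 2*((M:Int)+1) + (0:Int) := by push_cast; ring
              rw [e, (pvDivmod 2 ((M:Int)+1) 0 (by positivity) le_rfl (by positivity)).1,
                (pvDivmod 2 ((M:Int)+1) 0 (by positivity) le_rfl (by positivity)).2]
              norm_num)
            (fun i hi => by
              have e : ((M+1+(M+1+(i+1)) : Nat) : Int) = 2*((M:Int)+1) + ((i:Int)+1) := by push_cast; ring
              rw [e, (pvDivmod 2 ((M:Int)+1) ((i:Int)+1) (by positivity) (by positivity)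
                (by omega)).1,
                (pvDivmod 2 ((M:Int)+1) ((i:Int)+1) (by positivity) (by positivity)
                (by omega)).2]
              norm_num
              ring)).symm
        · exact (pvMapEq (M+1) _ _ (fun i hi => by
            have e : ((M+1+(M+1+(M+1+i)) : Nat) : Int) = 3*((M:Int)+1) + (i:Int) := by push_cast; ring
            rw [e, (pvDivmod 3 ((M:Int)+1) (i:Int) (by positivity) (by positivity)
              (by exact_mod_cast hi)).1,
              (pvDivmod 3 ((M:Int)+1) (i:Int) (by positivity) (by positivity)
              (by exact_mod_cast hi)).2]
            norm_num)).symm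

-- ===== VERDICT (by name: the statement is the Claim_ definition above) =====
theorem index_order_spec : Claim_equal_index_order := by
  intro n k _
  unfold Spec_index_order
  exact main_eq n k
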